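-- pv_equiv track=rewrite | github.com/naturalclimatesolutions/AF_as_NCS | fig4_spatial_temporal_chars/make_legend_for_MRV_radii.py | estimate_coord_precision
-- ===== SOURCE A (Python) =====
-- def estimate_coord_precision(coord):
--     ct = 0
--     # return 0 if no decimals
--     if '.' not in str(coord):
--         return ct
--     str_dec = str(coord).split('.')[1]
--     for i, dig in enumerate(str_dec):
--         ct += 1
--         if i+1 == len(str_dec):
--             return ct
--         elif i+2 == len(str_dec):
--             if str_dec[i+1] == dig:
--                 return ct
--             else:
--                 return ct+1
--         else:
--             if str_dec[i+2] == str_dec[i+1] == dig: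
--                 return ct
-- ===== SOURCE B (Python) =====
-- def estimate_coord_precision(coord):
--     s = str(coord)
--     if '.' not in s:
--         return 0
--     dec = s.split('.')[1]
--     if not dec:
--         return None  # mirrors A, which falls off its loop here
--     # run-length encode dec (built back to front): runs = [(digit, run_length), ...]
--     runs = []
--     for ch in reversed(dec):
--         if runs and runs[0][0] == ch:
--             runs[0] = (ch, runs[0][1] + 1)
--         else:
--             runs = [(ch, 1)] + runs
--     # precision = position just inside the first run of length >= 3 ...
--     pos = 0
--     for _, l in runs:
--         if l >= 3:
--             return pos + 1
--         pos += l
--     # ... else all of dec, minus one if it ends in a doubled digit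
--     return len(dec) - 1 if runs[-1][1] >= 2 else len(dec)
-- ===== Notes on version B (the rewrite author's own statement) =====
-- stated objective: alternative
-- what changed: B run-length-encodes the decimal part into (digit, run_length) pairs and reads the answer off the run structure (position of the first run of length >= 3, else length minus one iff the last run has length >= 2), instead of A's per-digit scan with two-character lookahead and inlined boundary cases.
-- outside the precondition, e.g. on estimate_coord_precision('1.'): A returns None, B returns None; on estimate_coord_precision('.'): A returns None, B returns None
import Mathlib
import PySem

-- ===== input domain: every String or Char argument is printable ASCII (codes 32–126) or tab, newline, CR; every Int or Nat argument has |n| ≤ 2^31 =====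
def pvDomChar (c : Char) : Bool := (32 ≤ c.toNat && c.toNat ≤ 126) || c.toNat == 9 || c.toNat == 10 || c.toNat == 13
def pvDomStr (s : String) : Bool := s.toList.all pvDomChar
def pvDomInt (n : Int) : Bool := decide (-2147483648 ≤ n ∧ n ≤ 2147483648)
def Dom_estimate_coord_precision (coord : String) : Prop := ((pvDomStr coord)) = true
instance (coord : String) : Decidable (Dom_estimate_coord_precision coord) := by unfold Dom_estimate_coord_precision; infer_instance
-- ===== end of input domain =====

-- B run-length-encodes the decimal part and reads the answer off the run lengths
-- (first run >= 3, last run >= 2) instead of A's per-digit lookahead scan; objective: alternative, same cost.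


-- ===== PORT A =====
-- A's enumerate-loop: ct counts positions; branch order as in the source
-- (i+1 == len ↔ one char left; i+2 == len ↔ two chars left); none = falls off the loop (empty dec).
def pvLoopA : List Char → Int → Option Int
  | [], _ => none
  | [_], ct => some (ct + 1)
  | [dig, d1], ct => if d1 = dig then some (ct + 1) else some (ct + 1 + 1)
  | dig :: d1 :: d2 :: rest, ct =>
      if d2 = d1 ∧ d1 = dig then some (ct + 1)
      else pvLoopA (d1 :: d2 :: rest) (ct + 1)

def estimate_coord_precision (coord : String) : Int :=
  if PySem.Chars.isIn ['.'] coord.toList = false then 0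
  else
    let str_dec := (PySem.Chars.splitOn coord.toList ['.']).getD 1 []
    (pvLoopA str_dec 0).getD 0   -- getD 0 unreachable under Pre_ (str_dec ≠ [])

-- ===== PORT B =====
-- Source B's reversed-iteration run-length encoder: foldr = consume chars back to front,
-- prepending a new run or bumping the front run's length.
def pvRle (dec : List Char) : List (Char × Nat) :=
  dec.foldr (fun c runs =>
    match runs with
    | (d, l) :: tl => if d = c then (c, l + 1) :: tl else (c, 1) :: (d, l) :: tl
    | [] => [(c, 1)]) []

-- Source B's run scan: pos is the number of digits before the current run
def pvScan : List (Char × Nat) → Int → Option Int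
  | [], _ => none
  | (_, l) :: tl, pos => if 3 ≤ l then some (pos + 1) else pvScan tl (pos + l)

def estimate_coord_precision_alt (coord : String) : Int :=
  if PySem.Chars.isIn ['.'] coord.toList = false then 0
  else
    let dec := (PySem.Chars.splitOn coord.toList ['.']).getD 1 []
    if dec.length = 0 then 0   -- Source B returns None here; outside Pre_
    else
      let runs := pvRle dec
      match pvScan runs 0 with
      | some v => v
      | none =>
          if 2 ≤ ((runs.getLast?).map Prod.snd).getD 0   -- runs[-1][1] >= 2
          then (dec.length : Int) - 1 else (dec.length : Int)

-- ===== PRECONDITION & SPEC =====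
-- Pre_ excludes strings containing '.' whose decimal part is empty (e.g. "1."): there A (and B)
-- return Python None, which is not a value of the declared int return type.
def Pre_estimate_coord_precision (coord : String) : Prop :=
  PySem.Chars.isIn ['.'] coord.toList = false ∨
  (PySem.Chars.splitOn coord.toList ['.']).getD 1 [] ≠ []
instance (coord : String) : Decidable (Pre_estimate_coord_precision coord) := by
  unfold Pre_estimate_coord_precision; infer_instance

def pvWitness_estimate_coord_precision : String := "3.14159"

def Spec_estimate_coord_precision (coord : String) (out : Int) : Prop := out = estimate_coord_precision_alt coord
instance (coord : String) (out : Int) : Decidable (Spec_estimate_coord_precision coord out) := by unfold Spec_estimate_coord_precision; infer_instance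

-- ===== CLAIM (what is proved, stated in full; the proofs are below) =====
def Claim_equal_estimate_coord_precision : Prop := ∀ (coord : String), Dom_estimate_coord_precision coord → Pre_estimate_coord_precision coord → Spec_estimate_coord_precision coord (estimate_coord_precision coord)

-- ===== LEMMAS AND PROOFS =====

-- proof-side characterisation of A: index of the first triple of equal consecutive digits
def pvFindTriple : List Char → Option Nat
  | a :: b :: c :: rest =>
      if a = b ∧ b = c then some 0
      else (pvFindTriple (b :: c :: rest)).map (· + 1)
  | _ => none

-- A's value on a nonempty decimal part, bundled for the loop lemma
def pvBVal (dec : List Char) : Int :=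
  match pvFindTriple dec with
  | some i => (i : Int) + 1
  | none =>
      if 2 ≤ dec.length ∧ PySem.List.pyGet? dec (-1) = PySem.List.pyGet? dec (-2)
      then (dec.length : Int) - 1 else (dec.length : Int)

lemma pyGet_neg_cons (d : Char) (tail : List Char) (k : Nat) (h1 : 0 < k) (h2 : k ≤ tail.length) :
    PySem.List.pyGet? (d :: tail) (-(k : Int)) = PySem.List.pyGet? tail (-(k : Int)) := by
  simp only [PySem.List.pyGet?, PySem.List.pyIdx?, List.length_cons]
  rw [if_neg (by omega), if_pos (by push_cast; omega), if_neg (by omega), if_pos (by omega)]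
  simp only [neg_neg, Int.toNat_natCast, Option.bind_some]
  have h : tail.length + 1 - k = (tail.length - k) + 1 := by omega
  rw [h]; simp

lemma loopA_eq_bval : ∀ (dec : List Char) (ct : Int), dec ≠ [] →
    pvLoopA dec ct = some (ct + pvBVal dec)
  | [], _, h => absurd rfl h
  | [d], ct, _ => by norm_num [pvLoopA, pvBVal, pvFindTriple]
  | [d, e], ct, _ => by
      by_cases h : e = d <;>
        simp [pvLoopA, pvBVal, pvFindTriple, h, PySem.List.pyGet?, PySem.List.pyIdx?]
      all_goals ring
  | d :: e :: f :: rest, ct, _ => by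
      by_cases htr : f = e ∧ e = d
      · simp [pvLoopA, pvBVal, pvFindTriple, htr]
      · rw [pvLoopA, if_neg htr, loopA_eq_bval (e :: f :: rest) (ct + 1) (by simp)]
        congr 1
        have hb : pvBVal (d :: e :: f :: rest) = 1 + pvBVal (e :: f :: rest) := by
          have hft : pvFindTriple (d :: e :: f :: rest)
              = (pvFindTriple (e :: f :: rest)).map (· + 1) := by
            rw [pvFindTriple, if_neg (by tauto)]
          unfold pvBVal
          rw [hft]
          cases hcase : pvFindTriple (e :: f :: rest) with
          | some i => simp; ring
          | none =>
              simp only [Option.map_none]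
              have g1 := pyGet_neg_cons d (e :: f :: rest) 1 (by omega) (by simp)
              have g2 := pyGet_neg_cons d (e :: f :: rest) 2 (by omega) (by simp)
              norm_num at g1 g2
              rw [g1, g2]
              simp only [List.length_cons]
              by_cases hc : PySem.List.pyGet? (e :: f :: rest) (-1)
                  = PySem.List.pyGet? (e :: f :: rest) (-2) <;>
                simp [hc] <;> ring
        rw [hb]; ring

-- pvRle unfolding step
lemma rle_cons_eq (c : Char) (rest : List Char) :
    pvRle (c :: rest) =
      (match pvRle rest with
       | (d, l) :: tl => if d = c then (c, l + 1) :: tl else (c, 1) :: (d, l) :: tl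
       | [] => [(c, 1)]) := rfl

-- the head run of pvRle (c :: rest) starts with c and has length ≥ 1
lemma rle_cons (c : Char) (rest : List Char) :
    ∃ l tl, pvRle (c :: rest) = (c, l) :: tl ∧ 1 ≤ l := by
  rw [rle_cons_eq]
  cases h : pvRle rest with
  | nil => exact ⟨1, [], rfl, le_refl 1⟩
  | cons p tl =>
      obtain ⟨d, l⟩ := p
      by_cases hd : d = c
      · exact ⟨l + 1, tl, by simp [hd], by omega⟩
      · exact ⟨1, (d, l) :: tl, by simp [hd], le_refl 1⟩

-- the run lengths of pvRle sum to the list's length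
lemma rle_sum : ∀ (dec : List Char), ((pvRle dec).map Prod.snd).sum = dec.length
  | [] => rfl
  | c :: rest => by
      rw [rle_cons_eq]
      cases h : pvRle rest with
      | nil =>
          have := rle_sum rest
          rw [h] at this; simp at this
          simp [← this]
      | cons p tl =>
          obtain ⟨d, l⟩ := p
          have := rle_sum rest
          rw [h] at this; simp at this
          by_cases hd : d = c <;> simp [hd, ← this] <;> omega

-- the scan over runs finds exactly the first triple position (+1)
lemma scan_eq : ∀ (dec : List Char) (pos : Int),
    pvScan (pvRle dec) pos = (pvFindTriple dec).map (fun i => pos + (i : Int) + 1)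
  | [], _ => rfl
  | [a], pos => by simp [pvRle, pvScan, pvFindTriple]
  | [a, b], pos => by
      by_cases h : b = a <;> simp [pvRle, pvScan, pvFindTriple, h]
  | a :: b :: c :: rest, pos => by
      obtain ⟨l1, tl1, hc, hl1⟩ := rle_cons c rest
      by_cases h1 : b = a
      · by_cases h2 : c = b
        · -- triple at the front
          have hb : pvRle (b :: c :: rest) = (b, l1 + 1) :: tl1 := by
            rw [rle_cons_eq, hc]; simp [h2]
          have ha : pvRle (a :: b :: c :: rest) = (a, l1 + 2) :: tl1 := by
            rw [rle_cons_eq, hb]; simp [h1]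
          rw [ha, pvScan, if_pos (by omega)]
          rw [pvFindTriple, if_pos ⟨h1.symm, h2.symm⟩]
          simp
        · -- a = b ≠ c : head run has length exactly 2
          have hb : pvRle (b :: c :: rest) = (b, 1) :: (c, l1) :: tl1 := by
            rw [rle_cons_eq, hc]; simp [h2]
          have ha : pvRle (a :: b :: c :: rest) = (a, 2) :: (c, l1) :: tl1 := by
            rw [rle_cons_eq, hb]; simp [h1]
          rw [ha, pvScan, if_neg (by omega), ← hc]
          push_cast
          rw [scan_eq (c :: rest) (pos + 2)]
          have hft : pvFindTriple (a :: b :: c :: rest)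
              = (pvFindTriple (b :: c :: rest)).map (· + 1) := by
            rw [pvFindTriple, if_neg (by tauto)]
          have hft2 : pvFindTriple (b :: c :: rest)
              = (pvFindTriple (c :: rest)).map (· + 1) := by
            cases rest with
            | nil => simp [pvFindTriple]
            | cons e r2 => rw [pvFindTriple, if_neg (by tauto)]
          rw [hft, hft2]
          cases pvFindTriple (c :: rest) <;> · simp; try ring
      · -- a ≠ b : head run of length 1
        obtain ⟨l0, tl0, hbr, _⟩ := rle_cons b (c :: rest)
        have ha : pvRle (a :: b :: c :: rest) = (a, 1) :: (b, l0) :: tl0 := by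
          rw [rle_cons_eq, hbr]; simp [h1]
        rw [ha, pvScan, if_neg (by omega)]
        have : pvScan ((b, l0) :: tl0) (pos + 1)
            = pvScan (pvRle (b :: c :: rest)) (pos + 1) := by rw [hbr]
        push_cast
        rw [this, scan_eq (b :: c :: rest) (pos + 1)]
        rw [pvFindTriple, if_neg (by tauto)]
        cases pvFindTriple (b :: c :: rest) <;> · simp; try ring

-- the last run has length ≥ 2 iff the last two digits are equal
lemma tail_eq : ∀ (dec : List Char), 2 ≤ dec.length →
    ((2 ≤ (((pvRle dec).getLast?).map Prod.snd).getD 0) ↔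
      PySem.List.pyGet? dec (-1) = PySem.List.pyGet? dec (-2))
  | [], h => by simp at h
  | [a], h => by simp at h
  | [a, b], _ => by
      by_cases h : b = a <;>
        simp [pvRle, h, PySem.List.pyGet?, PySem.List.pyIdx?]
  | a :: b :: c :: rest, _ => by
      have ih := tail_eq (b :: c :: rest) (by simp)
      have g1 := pyGet_neg_cons a (b :: c :: rest) 1 (by omega) (by simp)
      have g2 := pyGet_neg_cons a (b :: c :: rest) 2 (by omega) (by simp)
      norm_num at g1 g2
      rw [g1, g2, ← ih]
      obtain ⟨l0, tl0, hbr, hl0⟩ := rle_cons b (c :: rest)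
      rw [rle_cons_eq, hbr]
      cases htl : tl0 with
      | cons q tq =>
          by_cases hd : b = a <;> simp [hd, List.getLast?_cons_cons]
      | nil =>
          have hs := rle_sum (b :: c :: rest)
          rw [hbr, htl] at hs
          simp at hs
          by_cases hd : b = a <;> · simp [hd]; try omega

-- B's else-branch equals pvBVal on a nonempty decimal part
lemma runs_eq_bval (dec : List Char) (hne : dec ≠ []) :
    (match pvScan (pvRle dec) 0 with
     | some v => v
     | none =>
        if 2 ≤ (((pvRle dec).getLast?).map Prod.snd).getD 0
        then (dec.length : Int) - 1 else (dec.length : Int)) = pvBVal dec := by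
  rw [scan_eq dec 0]
  cases hft : pvFindTriple dec with
  | some i => simp [pvBVal, hft]
  | none =>
      have hred : (Option.map (fun i => (0 : Int) + i + 1)
          (do let a ← (none : Option Nat); pure ((a : Int)))) = none := rfl
      rw [hred]
      simp only [pvBVal, hft]
      by_cases hlen : 2 ≤ dec.length
      · have ht := tail_eq dec hlen
        by_cases hc : 2 ≤ (((pvRle dec).getLast?).map Prod.snd).getD 0
        · have := ht.mp hc
          simp [hc, hlen, this]
        · have hng : ¬ PySem.List.pyGet? dec (-1) = PySem.List.pyGet? dec (-2) :=
            fun h => hc (ht.mpr h)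
          simp [hc, hng]
      · match dec, hne with
        | [d], _ => simp [pvRle]
        | a :: b :: r, _ => simp at hlen

-- ===== VERDICT (by name: the statement is the Claim_ definition above) =====
theorem estimate_coord_precision_spec : Claim_equal_estimate_coord_precision := by
  intro coord _ hpre
  unfold Spec_estimate_coord_precision estimate_coord_precision estimate_coord_precision_alt
  by_cases hin : PySem.Chars.isIn ['.'] coord.toList = false
  · simp [hin]
  · rw [if_neg hin, if_neg hin]
    set dec := (PySem.Chars.splitOn coord.toList ['.']).getD 1 [] with hdec
    have hne : dec ≠ [] := by
      cases hpre with
      | inl h => exact absurd h hin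
      | inr h => exact h
    have hn : dec.length ≠ 0 := by simpa [List.length_eq_zero_iff] using hne
    rw [if_neg hn]
    show (pvLoopA dec 0).getD 0 =
      (match pvScan (pvRle dec) 0 with
       | some v => v
       | none =>
          if 2 ≤ (((pvRle dec).getLast?).map Prod.snd).getD 0
          then (dec.length : Int) - 1 else (dec.length : Int))
    rw [loopA_eq_bval dec 0 hne, runs_eq_bval dec hne]
    simp
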